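-- pv_equiv track=rewrite | github.com/JENCSandbox/leetcode-python-solutions | 7/main.py | int_to_inverted_list
-- ===== SOURCE A (Python) =====
-- def int_to_inverted_list(x):
--     # -2 147 483 647 to 2 147 483 647
--     list_result = []
--     temp = x
--     while temp > 0:
--         list_result.append(temp % 10)
--         temp //= 10
--
--     while len(list_result) < 10:
--         list_result.insert(0, 0)
--
--     return list_result
-- ===== SOURCE B (Python) =====
-- def int_to_inverted_list(x):
--     # Closed-form: scale x up to exactly 10 decimal digits, then read the
--     # j-th digit of the scaled value for fixed j = 0..9.
--     if x <= 0:
--         return [0] * 10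
--     y = x
--     while y < 10 ** 9:
--         y *= 10
--     return [y // 10 ** j % 10 for j in range(10)]
-- ===== Notes on version B (the rewrite author's own statement) =====
-- stated objective: alternative
-- what changed: Replaces A's dynamic digit-extraction loop followed by a front-insertion padding loop with a closed form: scale x once to exactly 10 decimal digits and read the 10 fixed digit positions directly in a single comprehension.
import Mathlib
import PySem

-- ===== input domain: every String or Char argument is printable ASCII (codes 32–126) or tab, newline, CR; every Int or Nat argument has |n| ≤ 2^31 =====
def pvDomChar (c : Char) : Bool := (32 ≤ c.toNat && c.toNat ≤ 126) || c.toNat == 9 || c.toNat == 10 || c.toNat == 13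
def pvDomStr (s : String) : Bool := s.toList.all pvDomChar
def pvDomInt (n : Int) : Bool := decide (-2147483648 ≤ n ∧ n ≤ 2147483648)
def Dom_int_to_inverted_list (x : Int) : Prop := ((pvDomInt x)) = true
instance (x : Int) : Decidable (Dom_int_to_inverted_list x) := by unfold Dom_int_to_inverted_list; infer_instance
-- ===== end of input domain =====

-- B replaces A's digit-extraction loop plus front-insertion padding loop by a
-- closed form: scale x up to exactly 10 decimal digits once, then read each of
-- the 10 fixed positions directly (objective: alternative decomposition).

-- ===== PORT A =====
-- while temp > 0: list_result.append(temp % 10); temp //= 10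
def pvDigitsLoop (temp : Int) (acc : List Int) : List Int :=
  if temp > 0 then
    pvDigitsLoop (PySem.Int.floordiv temp 10) (acc ++ [PySem.Int.mod temp 10])
  else acc
termination_by temp.toNat
decreasing_by
  have h : PySem.Int.floordiv temp 10 = temp / 10 := by
    simp [PySem.Int.floordiv, Int.fdiv_eq_ediv]
  rw [h]; omega

-- while len(list_result) < 10: list_result.insert(0, 0)
def pvPadLoop (l : List Int) : List Int :=
  if l.length < 10 then pvPadLoop (0 :: l) else l
termination_by 10 - l.length
decreasing_by simp; omega

def int_to_inverted_list (x : Int) : List Int :=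
  pvPadLoop (pvDigitsLoop x [])

-- ===== PORT B =====
-- while y < 10**9: y *= 10   (only reached with 0 < y, carried as a proof argument)
def pvScale (y : Int) (hy : 0 < y) : Int :=
  if y < 10 ^ 9 then pvScale (y * 10) (by omega) else y
termination_by ((10:Int) ^ 9 - y).toNat
decreasing_by omega

-- [y // 10**j % 10 for j in range(10)]; j ranges over 0..9 so 10**j = 10 ^ j.toNat exactly
def int_to_inverted_list_alt (x : Int) : List Int :=
  if h : x ≤ 0 then List.replicate 10 0
  else
    (PySem.List.pyRange 0 10 1).map
      (fun j => PySem.Int.mod (PySem.Int.floordiv (pvScale x (by omega)) (10 ^ j.toNat)) 10)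

-- ===== PRECONDITION & SPEC =====
def Spec_int_to_inverted_list (x : Int) (out : List Int) : Prop := out = int_to_inverted_list_alt x
instance (x : Int) (out : List Int) : Decidable (Spec_int_to_inverted_list x out) := by unfold Spec_int_to_inverted_list; infer_instance

-- ===== CLAIM (what is proved, stated in full; the proofs are below) =====
def Claim_equal_int_to_inverted_list : Prop := ∀ (x : Int), Dom_int_to_inverted_list x → Spec_int_to_inverted_list x (int_to_inverted_list x)

-- ===== LEMMAS AND PROOFS =====

lemma pvDigitsLoop_eq (n : ℕ) :
    ∀ acc, pvDigitsLoop (n : ℤ) acc = acc ++ (Nat.digits 10 n).map (Nat.cast : ℕ → ℤ) := by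
  induction n using Nat.strong_induction_on with
  | _ n ih =>
    intro acc
    rw [pvDigitsLoop.eq_def]
    by_cases h : 0 < n
    · have hpos : ((n : ℤ) > 0) := by exact_mod_cast h
      rw [if_pos hpos]
      have hdiv : PySem.Int.floordiv (n : ℤ) 10 = ((n / 10 : ℕ) : ℤ) := by
        simp [PySem.Int.floordiv, Int.fdiv_eq_ediv]
      have hmod : PySem.Int.mod (n : ℤ) 10 = ((n % 10 : ℕ) : ℤ) := by
        simp [PySem.Int.mod, Int.fmod_eq_emod]
      rw [hdiv, hmod, ih (n / 10) (Nat.div_lt_self h (by norm_num)),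
        Nat.digits_def' (by norm_num : 1 < 10) h]
      simp
    · rw [if_neg (by exact_mod_cast h)]
      have : n = 0 := by omega
      simp [this]

lemma pvPadLoop_eq : ∀ (k : ℕ) (l : List Int), 10 - l.length ≤ k →
    pvPadLoop l = List.replicate (10 - l.length) 0 ++ l := by
  intro k
  induction k with
  | zero =>
    intro l h
    rw [pvPadLoop.eq_def, if_neg (by omega)]
    have : 10 - l.length = 0 := by omega
    simp [this]
  | succ k ih =>
    intro l h
    rw [pvPadLoop.eq_def]
    split_ifs with hlt
    · rw [ih (0 :: l) (by simp; omega)]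
      have h1 : 10 - l.length = (10 - (0 :: l).length) + 1 := by simp; omega
      rw [h1, List.replicate_succ', List.append_assoc]
      simp
    · have : 10 - l.length = 0 := by omega
      simp [this]

lemma digits_len_le (n e : ℕ) (h : n < 10 ^ e) : (Nat.digits 10 n).length ≤ e := by
  by_cases hn : n = 0
  · simp [hn]
  · have h1 := Nat.base_pow_length_digits_le 10 n (by norm_num) hn
    by_contra hgt
    have h2 : (10:ℕ) ^ (e + 1) ≤ 10 ^ (Nat.digits 10 n).length :=
      Nat.pow_le_pow_right (by norm_num) (by omega)
    have h3 : (10:ℕ) ^ (e + 1) ≤ 10 * n := le_trans h2 h1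
    rw [pow_succ] at h3
    have h4 : (10:ℕ) ^ e ≤ n := by omega
    omega

lemma digits_len_ge (n e : ℕ) (h : 10 ^ e ≤ n) : e < (Nat.digits 10 n).length := by
  have h1 : n < 10 ^ (Nat.digits 10 n).length :=
    Nat.lt_base_pow_length_digits (by norm_num)
  exact (Nat.pow_lt_pow_iff_right (by norm_num)).mp (lt_of_le_of_lt h h1)

lemma pvScale_eq : ∀ (m : ℕ) (y : Int) (hy : 0 < y), ((10:Int) ^ 9 - y).toNat ≤ m → y < 10 ^ 10 →
    pvScale y hy = y * 10 ^ (10 - (Nat.digits 10 y.toNat).length) := by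
  intro m
  induction m with
  | zero =>
    intro y hy hle hlt
    rw [pvScale.eq_def, if_neg (by omega)]
    have h1 := digits_len_ge y.toNat 9 (by omega)
    have h2 := digits_len_le y.toNat 10 (by omega)
    have : 10 - (Nat.digits 10 y.toNat).length = 0 := by omega
    simp [this]
  | succ m ih =>
    intro y hy hle hlt
    rw [pvScale.eq_def]
    split_ifs with h
    · rw [ih (y * 10) (by omega) (by omega) (by omega)]
      have h10 : (y * 10).toNat = 10 * y.toNat := by omega
      have hd : Nat.digits 10 (10 * y.toNat) = 0 :: Nat.digits 10 y.toNat := by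
        rw [Nat.digits_def' (by norm_num : 1 < 10) (by omega)]
        congr 1
        · omega
        · congr 1; omega
      have h9 := digits_len_le y.toNat 9 (by omega)
      rw [h10, hd]
      have he : 10 - (Nat.digits 10 y.toNat).length
          = (10 - (0 :: Nat.digits 10 y.toNat).length) + 1 := by simp; omega
      rw [he, pow_succ]
      ring
    · have h1 := digits_len_ge y.toNat 9 (by omega)
      have h2 := digits_len_le y.toNat 10 (by omega)
      have : 10 - (Nat.digits 10 y.toNat).length = 0 := by omega
      simp [this]

lemma digits_getD (n : ℕ) : ∀ i, (Nat.digits 10 n).getD i 0 = n / 10 ^ i % 10 := by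
  induction n using Nat.strong_induction_on with
  | _ n ih =>
    intro i
    by_cases hn : 0 < n
    · rw [Nat.digits_def' (by norm_num : 1 < 10) hn]
      cases i with
      | zero => simp
      | succ i =>
        simp only [List.getD_cons_succ]
        rw [ih (n / 10) (Nat.div_lt_self hn (by norm_num)) i,
          Nat.div_div_eq_div_mul, ← pow_succ']
    · have : n = 0 := by omega
      simp [this]

lemma pyRange10 : PySem.List.pyRange 0 10 1 = (List.range 10).map (Nat.cast : ℕ → ℤ) := by
  decide

lemma int_to_inverted_list_spec_aux (x : Int) (hdom : Dom_int_to_inverted_list x) :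
    int_to_inverted_list x = int_to_inverted_list_alt x := by
  unfold Dom_int_to_inverted_list pvDomInt at hdom
  simp only [decide_eq_true_eq] at hdom
  unfold int_to_inverted_list int_to_inverted_list_alt
  by_cases hx : x ≤ 0
  · rw [dif_pos hx, pvDigitsLoop.eq_def, if_neg (by omega)]
    rw [pvPadLoop_eq 10 [] (by simp)]
    simp
  · rw [dif_neg hx]
    set n := x.toNat with hn
    have hxn : x = (n : ℤ) := by omega
    have hnpos : 0 < n := by omega
    have hnlt : n < 10 ^ 10 := by omega
    set k := (Nat.digits 10 n).length with hk
    have hk10 : k ≤ 10 := digits_len_le n 10 hnlt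
    -- A's side
    have hA : pvPadLoop (pvDigitsLoop x [])
        = List.replicate (10 - k) 0 ++ (Nat.digits 10 n).map (Nat.cast : ℕ → ℤ) := by
      conv_lhs => rw [hxn]
      rw [pvDigitsLoop_eq n [], List.nil_append, pvPadLoop_eq 10 _ (by omega)]
      simp only [List.length_map, ← hk]
    rw [hA]
    -- B's side: the scaled value is n * 10^(10-k)
    have hscale : ∀ hxp : 0 < x, pvScale x hxp = ((n * 10 ^ (10 - k) : ℕ) : ℤ) := by
      intro hxp
      rw [pvScale_eq (((10:Int) ^ 9 - x).toNat) x hxp le_rfl (by omega), ← hn, ← hk, hxn]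
      push_cast
      ring
    rw [hscale (by omega), pyRange10]
    set N := n * 10 ^ (10 - k) with hN
    have hfun : ∀ i : ℕ,
        PySem.Int.mod (PySem.Int.floordiv ((N : ℕ) : ℤ) (10 ^ ((i : ℤ)).toNat)) 10
          = ((N / 10 ^ i % 10 : ℕ) : ℤ) := by
      intro i
      have h1 : ((10:ℤ) ^ ((i : ℤ)).toNat) = ((10 ^ i : ℕ) : ℤ) := by simp
      rw [h1]
      simp [PySem.Int.floordiv, PySem.Int.mod, Int.fdiv_eq_ediv, Int.fmod_eq_emod]
    apply List.ext_getElem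
    · simp [← hk]; omega
    · intro i h1 h2
      have hi : i < 10 := by simpa using h2
      rw [List.getElem_map, List.getElem_map, List.getElem_range, hfun i]
      by_cases hik : i < 10 - k
      · rw [List.getElem_append_left (by simp; omega), List.getElem_replicate]
        have hsplit : 10 - k = i + (10 - k - i) := by omega
        have hm1 : 1 ≤ 10 - k - i := by omega
        have : N / 10 ^ i % 10 = 0 := by
          rw [hN, hsplit, pow_add, ← mul_assoc, mul_comm n (10 ^ i), mul_assoc,
            Nat.mul_div_cancel_left _ (by positivity : 0 < (10:ℕ) ^ i)]
          have h2' : 10 - k - i = (10 - k - i - 1) + 1 := by omega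
          rw [h2', pow_succ, ← mul_assoc]
          exact Nat.mul_mod_left _ 10
        rw [this]
        simp
      · have hlen : i - (10 - k) < (Nat.digits 10 n).length := by
          rw [← hk]; omega
        rw [List.getElem_append_right (by simp; omega)]
        rw [List.getElem_map]
        simp only [List.length_replicate]
        rw [← List.getD_eq_getElem _ 0 hlen, digits_getD]
        congr 1
        set d := i - (10 - k) with hd
        have hsplit : i = (10 - k) + d := by omega
        rw [hN, hsplit, pow_add, ← Nat.div_div_eq_div_mul,
          Nat.mul_div_cancel _ (by positivity : 0 < (10:ℕ) ^ (10 - k))]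

-- ===== VERDICT (by name: the statement is the Claim_ definition above) =====
theorem int_to_inverted_list_spec : Claim_equal_int_to_inverted_list := by
  intro x hdom
  unfold Spec_int_to_inverted_list
  exact int_to_inverted_list_spec_aux x hdom
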